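-- pv_equiv track=rewrite | github.com/luisbrandao/talemate | src/talemate/client/base.py | repetition_adjustment
-- ===== SOURCE A (Python) =====
-- def repetition_adjustment(prompt: str, is_repetitive: bool = False):
--     """
--     Breaks the prompt into lines and checkse each line for a match with
--     [$REPETITION|{repetition_adjustment}].
--
--     On match and if is_repetitive is True, the line is removed from the prompt and
--     replaced with the repetition_adjustment.
--
--     On match and if is_repetitive is False, the line is removed from the prompt.
--     """
--
--     lines = prompt.split("\n")
--     new_lines = []
--     for line in lines:
--         if line.startswith("[$REPETITION|"):
--             if is_repetitive:
--                 new_lines.append(line.split("|")[1][:-1])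
--             else:
--                 new_lines.append("")
--         else:
--             new_lines.append(line)
--
--     return "\n".join(new_lines)
-- ===== SOURCE B (Python) =====
-- def repetition_adjustment(prompt: str, is_repetitive: bool = False):
--     """Single left-to-right scan over the prompt: at each line start, either
--     copy the line, or (for a marker line) emit the adjustment text / nothing,
--     then skip to the newline.  No split/​join on lines."""
--     mark = "[$REPETITION|"
--     out = []
--     i = 0
--     n = len(prompt)
--     while True:
--         if prompt.startswith(mark, i):
--             if is_repetitive:
--                 k = i + len(mark)
--                 while k < n and prompt[k] != "|" and prompt[k] != "\n":
--                     k += 1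
--                 out.append(prompt[i + len(mark):k][:-1])
--             while i < n and prompt[i] != "\n":
--                 i += 1
--         else:
--             j = i
--             while j < n and prompt[j] != "\n":
--                 j += 1
--             out.append(prompt[i:j])
--             i = j
--         if i < n:
--             out.append("\n")
--             i += 1
--         else:
--             return "".join(out)
-- ===== Notes on version B (the rewrite author's own statement) =====
-- stated objective: alternative
-- what changed: B replaces A's split-into-lines / per-line list / join pipeline with a single index-based left-to-right scan that copies or rewrites each line in place and never materialises the line list.
import Mathlib
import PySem

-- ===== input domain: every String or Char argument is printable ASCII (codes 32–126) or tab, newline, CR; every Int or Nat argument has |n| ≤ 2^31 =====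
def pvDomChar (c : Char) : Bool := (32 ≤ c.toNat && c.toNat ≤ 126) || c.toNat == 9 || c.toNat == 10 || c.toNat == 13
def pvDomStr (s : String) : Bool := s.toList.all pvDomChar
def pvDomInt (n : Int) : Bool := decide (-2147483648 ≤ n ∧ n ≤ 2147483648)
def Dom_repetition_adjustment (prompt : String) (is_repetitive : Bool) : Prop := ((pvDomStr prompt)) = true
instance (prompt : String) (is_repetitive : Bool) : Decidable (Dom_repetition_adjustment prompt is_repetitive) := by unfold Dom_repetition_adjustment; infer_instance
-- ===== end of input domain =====

-- B replaces A's split-lines/append/join pipeline with one left-to-right scan over the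
-- characters (objective: alternative; same O(n) cost).

-- ===== PORT A =====
-- A: lines = prompt.split("\n"); for each line, on marker prefix append the
-- adjustment text ('|'-field 1 minus its last char) or "", else the line; join with "\n".
def repetition_adjustment (prompt : String) (is_repetitive : Bool) : String :=
  let lines := PySem.Chars.splitOn prompt.toList ['\n']
  let new_lines := lines.foldl (fun acc line =>
    if PySem.Chars.startswith line "[$REPETITION|".toList then
      if is_repetitive then
        -- line.split("|")[1][:-1]; the index-1 field exists because line contains '|',
        -- so the .getD [] default is never used
        acc ++ [PySem.List.slice ((PySem.List.pyGet? (PySem.Chars.splitOn line ['|']) 1).getD []) none (some (-1))]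
      else acc ++ [[]]
    else acc ++ [line]) ([] : List (List Char))
  String.ofList (PySem.Chars.join ['\n'] new_lines)

-- ===== PORT B =====
-- B's scan: at a line start, a marker line contributes the adjustment field (chars after
-- the mark, up to '|' or '\n', minus the last one) when is_repetitive and nothing
-- otherwise; a plain line is copied; then the newline is emitted and the scan continues.
def repetition_adjustment_altGo (is_repetitive : Bool) (cs : List Char) : List Char :=
  (if "[$REPETITION|".toList.isPrefixOf cs then
    (if is_repetitive then
      ((cs.drop 13).takeWhile (fun c => c ≠ '|' && c ≠ '\n')).dropLast
    else [])
  else cs.takeWhile (· ≠ '\n')) ++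
  (match h : cs.dropWhile (· ≠ '\n') with
   | [] => []
   | _ :: t => '\n' :: repetition_adjustment_altGo is_repetitive t)
termination_by cs.length
decreasing_by
  have h1 : (cs.dropWhile (· ≠ '\n')).length ≤ cs.length := cs.length_dropWhile_le _
  rw [h] at h1; simp at h1 ⊢; omega

def repetition_adjustment_alt (prompt : String) (is_repetitive : Bool) : String :=
  String.ofList (repetition_adjustment_altGo is_repetitive prompt.toList)

-- ===== PRECONDITION & SPEC =====
def Spec_repetition_adjustment (prompt : String) (is_repetitive : Bool) (out : String) : Prop := out = repetition_adjustment_alt prompt is_repetitive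
instance (prompt : String) (is_repetitive : Bool) (out : String) : Decidable (Spec_repetition_adjustment prompt is_repetitive out) := by unfold Spec_repetition_adjustment; infer_instance

-- ===== CLAIM (what is proved, stated in full; the proofs are below) =====
def Claim_equal_repetition_adjustment : Prop := ∀ (prompt : String) (is_repetitive : Bool), Dom_repetition_adjustment prompt is_repetitive → Spec_repetition_adjustment prompt is_repetitive (repetition_adjustment prompt is_repetitive)

-- ===== LEMMAS AND PROOFS =====

-- reference single-char split, structured for induction
def splitC (c : Char) (cs : List Char) : List (List Char) :=
  cs.takeWhile (· ≠ c) ::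
  (match h : cs.dropWhile (· ≠ c) with
   | [] => []
   | _ :: t => splitC c t)
termination_by cs.length
decreasing_by
  have h1 : (cs.dropWhile (· ≠ c)).length ≤ cs.length := cs.length_dropWhile_le _
  rw [h] at h1; simp at h1 ⊢; omega

lemma splitC_of_nil {c : Char} {cs : List Char} (h : cs.dropWhile (· ≠ c) = []) :
    splitC c cs = [cs.takeWhile (· ≠ c)] := by
  rw [splitC]
  congr 1
  split
  · rfl
  · rename_i head t heq
    simp only [ne_eq, decide_not] at h heq
    rw [h] at heq
    simp at heq

lemma splitC_of_cons {c a : Char} {cs t : List Char} (h : cs.dropWhile (· ≠ c) = a :: t) :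
    splitC c cs = cs.takeWhile (· ≠ c) :: splitC c t := by
  rw [splitC]
  congr 1
  split
  · rename_i heq
    simp only [ne_eq, decide_not] at h heq
    rw [h] at heq
    simp at heq
  · rename_i head t' heq
    simp only [ne_eq, decide_not] at h heq
    rw [h] at heq
    obtain ⟨rfl, rfl⟩ := List.cons_eq_cons.mp heq
    rfl

lemma altGo_of_nil {rep : Bool} {cs : List Char} (h : cs.dropWhile (· ≠ '\n') = []) :
    repetition_adjustment_altGo rep cs =
      (if "[$REPETITION|".toList.isPrefixOf cs then
        (if rep then ((cs.drop 13).takeWhile (fun c => c ≠ '|' && c ≠ '\n')).dropLast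
         else [])
       else cs.takeWhile (· ≠ '\n')) ++ ([] : List Char) := by
  rw [repetition_adjustment_altGo]
  congr 1
  split
  · rfl
  · rename_i head t heq
    simp only [ne_eq, decide_not] at h heq
    rw [h] at heq
    simp at heq

lemma altGo_of_cons {rep : Bool} {cs : List Char} {a : Char} {t : List Char}
    (h : cs.dropWhile (· ≠ '\n') = a :: t) :
    repetition_adjustment_altGo rep cs =
      (if "[$REPETITION|".toList.isPrefixOf cs then
        (if rep then ((cs.drop 13).takeWhile (fun c => c ≠ '|' && c ≠ '\n')).dropLast
         else [])
       else cs.takeWhile (· ≠ '\n')) ++ '\n' :: repetition_adjustment_altGo rep t := by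
  rw [repetition_adjustment_altGo]
  congr 1
  split
  · rename_i heq
    simp only [ne_eq, decide_not] at h heq
    rw [h] at heq
    simp at heq
  · rename_i head t' heq
    simp only [ne_eq, decide_not] at h heq
    rw [h] at heq
    obtain ⟨rfl, rfl⟩ := List.cons_eq_cons.mp heq
    rfl

lemma splitC_ne_nil (c : Char) (cs : List Char) : splitC c cs ≠ [] := by
  cases hd : cs.dropWhile (· ≠ c) with
  | nil => rw [splitC_of_nil hd]; simp
  | cons a t => rw [splitC_of_cons hd]; simp

def addFirst (p : List Char) (ls : List (List Char)) : List (List Char) :=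
  match ls with
  | [] => []
  | x :: xs => (p ++ x) :: xs

lemma addFirst_cons (p x : List Char) (xs : List (List Char)) :
    addFirst p (x :: xs) = (p ++ x) :: xs := rfl

lemma addFirst_nil_of_ne (ls : List (List Char)) (h : ls ≠ []) :
    addFirst [] ls = ls := by
  cases ls with
  | nil => exact absurd rfl h
  | cons x xs => simp [addFirst_cons]

lemma addFirst_addFirst (p q : List Char) (ls : List (List Char)) :
    addFirst p (addFirst q ls) = addFirst (p ++ q) ls := by
  cases ls <;> simp [addFirst]

lemma splitC_nil (c : Char) : splitC c [] = [[]] := by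
  rw [splitC_of_nil (by simp)]; simp

lemma splitC_cons_eq (c : Char) (rest : List Char) :
    splitC c (c :: rest) = [] :: splitC c rest := by
  rw [splitC_of_cons (a := c) (t := rest) (by simp)]; simp

lemma splitC_cons_ne (c a : Char) (rest : List Char) (h : ¬ a = c) :
    splitC c (a :: rest) = addFirst [a] (splitC c rest) := by
  have hstep : (a :: rest).dropWhile (· ≠ c) = rest.dropWhile (· ≠ c) := by
    rw [List.dropWhile_cons]; simp [h]
  cases hd : rest.dropWhile (· ≠ c) with
  | nil =>
    rw [splitC_of_nil (hstep.trans hd), splitC_of_nil hd]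
    simp [addFirst, h]
  | cons b t =>
    rw [splitC_of_cons (hstep.trans hd), splitC_of_cons hd]
    simp [addFirst, h]

lemma splitOn_go_single (c : Char) :
    ∀ fuel (l cur : List Char) (acc : List (List Char)), l.length < fuel →
    PySem.Chars.splitOn.go [c] fuel l cur acc =
      acc.reverse ++ addFirst cur.reverse (splitC c l) := by
  intro fuel
  induction fuel with
  | zero => intro l cur acc h; omega
  | succ n ih =>
    intro l cur acc h
    cases l with
    | nil =>
      rw [PySem.Chars.splitOn.go, splitC_nil]
      simp [addFirst_cons]
      omega
    | cons a rest =>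
      rw [PySem.Chars.splitOn.go]
      by_cases hac : a = c
      · subst hac
        have hp : [a].isPrefixOf (a :: rest) = true := by simp [List.isPrefixOf]
        rw [if_pos hp]
        simp only [List.length_cons, List.length_nil, List.drop_succ_cons, List.drop_zero]
        rw [ih rest [] (cur.reverse :: acc) (by simp at h ⊢; omega)]
        rw [splitC_cons_eq, addFirst_cons]
        simp only [List.reverse_nil]
        rw [addFirst_nil_of_ne _ (splitC_ne_nil a rest)]
        simp
      · have hp : [c].isPrefixOf (a :: rest) = false := by
          simp [List.isPrefixOf]; exact fun hh => absurd hh.symm hac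
        rw [if_neg (by simp [hp])]
        rw [ih rest (a :: cur) acc (by simp at h ⊢; omega)]
        rw [splitC_cons_ne c a rest hac, addFirst_addFirst]
        simp

lemma splitOn_single (c : Char) (cs : List Char) :
    PySem.Chars.splitOn cs [c] = splitC c cs := by
  rw [PySem.Chars.splitOn, splitOn_go_single c (cs.length + 1) cs [] [] (by omega)]
  simp [addFirst_nil_of_ne _ (splitC_ne_nil c cs)]

lemma foldl_append_map {α β : Type} (f : α → β) :
    ∀ (ls : List α) (acc : List β),
    ls.foldl (fun a l => a ++ [f l]) acc = acc ++ ls.map f := by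
  intro ls
  induction ls with
  | nil => simp
  | cons x xs ih => intro acc; simp [List.foldl_cons, ih]

-- the per-line transformation A applies
def lineF (is_repetitive : Bool) (line : List Char) : List Char :=
  if PySem.Chars.startswith line "[$REPETITION|".toList then
    if is_repetitive then
      PySem.List.slice ((PySem.List.pyGet? (PySem.Chars.splitOn line ['|']) 1).getD []) none (some (-1))
    else []
  else line

lemma isPrefixOf_takeWhile {p : Char → Bool} (mark : List Char)
    (hall : ∀ a ∈ mark, p a = true) :
    ∀ cs : List Char, mark.isPrefixOf (cs.takeWhile p) = mark.isPrefixOf cs := by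
  induction mark with
  | nil => intro cs; simp [List.isPrefixOf]
  | cons m ms ih =>
    intro cs
    cases cs with
    | nil => simp [List.takeWhile]
    | cons a rest =>
      simp only [List.takeWhile_cons]
      by_cases hpa : p a = true
      · simp only [hpa, if_true]
        by_cases hma : m = a
        · subst hma
          simp [List.isPrefixOf, ih (fun x hx => hall x (by simp [hx]))]
        · have hba : (m == a) = false := by simp [hma]
          simp [List.isPrefixOf, hba]
      · have hm : p m = true := hall m (by simp)
        have : ¬ m = a := fun hh => hpa (hh ▸ hm)
        simp [hpa, List.isPrefixOf, this]

lemma mark_all_ne_nl : ∀ a ∈ "[$REPETITION|".toList, (a ≠ '\n' : Bool) = true :=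
  List.all_eq_true.mp (by decide)

lemma mark12_all_ne_bar : ∀ a ∈ "[$REPETITION".toList, (a ≠ '|' : Bool) = true :=
  List.all_eq_true.mp (by decide)

lemma takeWhile_append_all {p : Char → Bool} :
    ∀ (l1 l2 : List Char), (∀ a ∈ l1, p a = true) →
    (l1 ++ l2).takeWhile p = l1 ++ l2.takeWhile p := by
  intro l1
  induction l1 with
  | nil => simp
  | cons a rest ih =>
    intro l2 h
    simp only [List.cons_append, List.takeWhile_cons, h a (by simp), if_true,
      ih l2 (fun x hx => h x (by simp [hx]))]

lemma dropWhile_append_all {p : Char → Bool} :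
    ∀ (l1 l2 : List Char), (∀ a ∈ l1, p a = true) →
    (l1 ++ l2).dropWhile p = l2.dropWhile p := by
  intro l1
  induction l1 with
  | nil => simp
  | cons a rest ih =>
    intro l2 h
    simp only [List.cons_append, List.dropWhile_cons, h a (by simp), if_true,
      ih l2 (fun x hx => h x (by simp [hx]))]

lemma pyGet?_one {α : Type} (a x : α) (xs : List α) :
    PySem.List.pyGet? (a :: x :: xs) 1 = some x := by
  simp [PySem.List.pyGet?, PySem.List.pyIdx?]

lemma takeWhile_mark (cs : List Char)
    (hpre : "[$REPETITION|".toList.isPrefixOf cs = true) :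
    cs.takeWhile (· ≠ '\n') =
      "[$REPETITION|".toList ++ (cs.drop 13).takeWhile (· ≠ '\n') := by
  obtain ⟨t, rfl⟩ := List.isPrefixOf_iff_prefix.mp hpre
  have h13 : ("[$REPETITION|".toList).length = 13 := by decide
  rw [takeWhile_append_all _ _ mark_all_ne_nl, List.drop_left' h13]

-- A's per-line transformation on a marker line, computed to B's expression
lemma lineF_marker (rep : Bool) (cs : List Char)
    (hpre : "[$REPETITION|".toList.isPrefixOf cs = true) :
    lineF rep (cs.takeWhile (· ≠ '\n')) =
      if rep then ((cs.drop 13).takeWhile (fun c => c ≠ '|' && c ≠ '\n')).dropLast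
      else [] := by
  have hline := takeWhile_mark cs hpre
  have hpre' : PySem.Chars.startswith (cs.takeWhile (· ≠ '\n')) "[$REPETITION|".toList = true := by
    rw [PySem.Chars.startswith, isPrefixOf_takeWhile _ mark_all_ne_nl, hpre]
  rw [lineF, if_pos hpre']
  cases rep with
  | false => simp
  | true =>
    simp only [if_true]
    -- split the marker line on '|': field 0 is "[$REPETITION", field 1 the adjustment
    set u := (cs.drop 13).takeWhile (· ≠ '\n') with hu
    have hsplit : cs.takeWhile (· ≠ '\n') = "[$REPETITION".toList ++ '|' :: u := by
      rw [hline]; rfl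
    rw [hsplit, splitOn_single]
    have hdw : ("[$REPETITION".toList ++ '|' :: u).dropWhile (· ≠ '|') = '|' :: u := by
      rw [dropWhile_append_all _ _ mark12_all_ne_bar]; simp
    have htw : ("[$REPETITION".toList ++ '|' :: u).takeWhile (· ≠ '|') = "[$REPETITION".toList := by
      rw [takeWhile_append_all _ _ mark12_all_ne_bar]; simp
    rw [splitC_of_cons hdw, htw]
    cases hs : splitC '|' u with
    | nil => exact absurd hs (splitC_ne_nil '|' u)
    | cons x xs =>
      have hx : x = u.takeWhile (· ≠ '|') := by
        cases hd : u.dropWhile (· ≠ '|') with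
        | nil => rw [splitC_of_nil hd] at hs; exact (List.cons_eq_cons.mp hs).1.symm
        | cons b t => rw [splitC_of_cons hd] at hs; exact (List.cons_eq_cons.mp hs).1.symm
      rw [pyGet?_one]
      simp only [Option.getD_some, PySem.List.slice_to_neg_one]
      rw [hx, hu, List.takeWhile_takeWhile]
      congr 2
      funext a
      by_cases h1 : a = '|' <;> by_cases h2 : a = '\n' <;> simp [h1, h2]

lemma join_map_splitC (rep : Bool) :
    ∀ cs : List Char,
    PySem.Chars.join ['\n'] ((splitC '\n' cs).map (lineF rep)) =
      repetition_adjustment_altGo rep cs := by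
  intro cs
  induction hn : cs.length using Nat.strong_induction_on generalizing cs with
  | _ n ih =>
  subst hn
  have hbranch :
      lineF rep (cs.takeWhile (· ≠ '\n')) =
        (if "[$REPETITION|".toList.isPrefixOf cs then
          (if rep then ((cs.drop 13).takeWhile (fun c => c ≠ '|' && c ≠ '\n')).dropLast
           else [])
         else cs.takeWhile (· ≠ '\n')) := by
    by_cases hpre : "[$REPETITION|".toList.isPrefixOf cs = true
    · rw [if_pos hpre, lineF_marker rep cs hpre]
    · rw [if_neg hpre, lineF]
      have hsw : PySem.Chars.startswith (cs.takeWhile (· ≠ '\n')) "[$REPETITION|".toList = false := by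
        rw [PySem.Chars.startswith, isPrefixOf_takeWhile _ mark_all_ne_nl]
        simp only [Bool.not_eq_true] at hpre
        exact hpre
      rw [hsw]; simp
  cases hd : cs.dropWhile (· ≠ '\n') with
  | nil =>
    rw [splitC_of_nil hd, altGo_of_nil hd]
    simp only [List.map_cons, List.map_nil, PySem.Chars.join_singleton, hbranch,
      List.append_nil]
  | cons a t =>
    have hlt : t.length < cs.length := by
      have h1 : (cs.dropWhile (· ≠ '\n')).length ≤ cs.length := cs.length_dropWhile_le _
      rw [hd] at h1; simp at h1; omega
    rw [splitC_of_cons hd, altGo_of_cons hd, List.map_cons]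
    cases hs : splitC '\n' t with
    | nil => exact absurd hs (splitC_ne_nil '\n' t)
    | cons y ys =>
      rw [List.map_cons, PySem.Chars.join_cons_cons, ← List.map_cons, ← hs,
        ih t.length hlt t rfl, hbranch]
      simp

-- ===== VERDICT (by name: the statement is the Claim_ definition above) =====
theorem repetition_adjustment_spec : Claim_equal_repetition_adjustment := by
  intro prompt rep _
  unfold Spec_repetition_adjustment repetition_adjustment repetition_adjustment_alt
  have hfun : (fun (acc : List (List Char)) (line : List Char) =>
      if PySem.Chars.startswith line "[$REPETITION|".toList then
        if rep then acc ++
          [PySem.List.slice ((PySem.List.pyGet? (PySem.Chars.splitOn line ['|']) 1).getD []) none (some (-1))]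
        else acc ++ [[]]
      else acc ++ [line]) = fun acc line => acc ++ [lineF rep line] := by
    funext acc line
    rw [lineF]
    split_ifs <;> rfl
  rw [splitOn_single, hfun]
  simp only [foldl_append_map (lineF rep), List.nil_append, join_map_splitC]
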